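-- pv_equiv track=rewrite | github.com/ArcHound/password-policy-calculations | utils.py | normalize_device
-- ===== SOURCE A (Python) =====
-- card_mapping = {
--     "A100": ["A100-PCIE-40GB", "A100-SXM4-40GB"],
--     "H100": ["NVIDIA H100 PCIe"],
--     "V100": ["Tesla V100-SXM2-16GB"],
--     "P100": ["Tesla P100-PCIE-16GB"],
--     "T4": ["Tesla T4"],
--     "A5000": ["NVIDIA RTX A5000"],
--     "GTX 1080 Ti": ["GeForce GTX 1080 Ti", "NVIDIA GeForce GTX 1080 Ti"],
--     "RTX 2070": ["GeForce RTX 2070 SUPER", "NVIDIA GeForce RTX 2070 SUPER"],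
--     "RTX 2080 Ti": ["GeForce RTX 2080 Ti", "NVIDIA GeForce RTX 2080 Ti"],
--     "RTX 3080": ["GeForce RTX 3080", "NVIDIA GeForce RTX 3080"],
--     "RTX 3080 Ti": ["GeForce RTX 3080 Ti", "NVIDIA GeForce RTX 3080 Ti"],
--     "RTX 3090": ["GeForce RTX 3090", "NVIDIA GeForce RTX 3090"],
--     "RTX 3090 Ti": ["GeForce RTX 3090 Ti", "NVIDIA GeForce RTX 3090 Ti"],
--     "RTX 4090": ["GeForce RTX 4090", "NVIDIA GeForce RTX 4090"],
--     "RTX 4090 Ti": ["GeForce RTX 4090 Ti", "NVIDIA GeForce RTX 4090 Ti"],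
-- }
--
-- def normalize_device(device):
--     if "#" in device:
--         new_dev = device.split(" #")[0]
--     else:
--         new_dev = device
--     for c in card_mapping:
--         if new_dev in card_mapping[c]:
--             return c
-- ===== SOURCE B (Python) =====
-- # Flat (alias, canonical) table kept sorted by alias; lookup is an iterative
-- # binary search instead of A's linear scan over the mapping's keys.
-- _SORTED_PAIRS = [
--     ("A100-PCIE-40GB", "A100"),
--     ("A100-SXM4-40GB", "A100"),
--     ("GeForce GTX 1080 Ti", "GTX 1080 Ti"),
--     ("GeForce RTX 2070 SUPER", "RTX 2070"),
--     ("GeForce RTX 2080 Ti", "RTX 2080 Ti"),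
--     ("GeForce RTX 3080", "RTX 3080"),
--     ("GeForce RTX 3080 Ti", "RTX 3080 Ti"),
--     ("GeForce RTX 3090", "RTX 3090"),
--     ("GeForce RTX 3090 Ti", "RTX 3090 Ti"),
--     ("GeForce RTX 4090", "RTX 4090"),
--     ("GeForce RTX 4090 Ti", "RTX 4090 Ti"),
--     ("NVIDIA GeForce GTX 1080 Ti", "GTX 1080 Ti"),
--     ("NVIDIA GeForce RTX 2070 SUPER", "RTX 2070"),
--     ("NVIDIA GeForce RTX 2080 Ti", "RTX 2080 Ti"),
--     ("NVIDIA GeForce RTX 3080", "RTX 3080"),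
--     ("NVIDIA GeForce RTX 3080 Ti", "RTX 3080 Ti"),
--     ("NVIDIA GeForce RTX 3090", "RTX 3090"),
--     ("NVIDIA GeForce RTX 3090 Ti", "RTX 3090 Ti"),
--     ("NVIDIA GeForce RTX 4090", "RTX 4090"),
--     ("NVIDIA GeForce RTX 4090 Ti", "RTX 4090 Ti"),
--     ("NVIDIA H100 PCIe", "H100"),
--     ("NVIDIA RTX A5000", "A5000"),
--     ("Tesla P100-PCIE-16GB", "P100"),
--     ("Tesla T4", "T4"),
--     ("Tesla V100-SXM2-16GB", "V100"),
-- ]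
--
-- def normalize_device(device):
--     if "#" in device:
--         new_dev = device.split(" #")[0]
--     else:
--         new_dev = device
--     lo, hi = 0, len(_SORTED_PAIRS)
--     while lo < hi:
--         mid = (lo + hi) // 2
--         alias, canon = _SORTED_PAIRS[mid]
--         if alias == new_dev:
--             return canon
--         if alias < new_dev:
--             lo = mid + 1
--         else:
--             hi = mid
--     return None
-- ===== Notes on version B (the rewrite author's own statement) =====
-- stated objective: alternative
-- what changed: Replaces the per-call linear scan over the mapping's keys with inner list-membership tests by a flat (alias, canonical) table kept sorted by alias, searched with an iterative binary search; unmatched devices fall out of the loop and return None as in A.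
import Mathlib
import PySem

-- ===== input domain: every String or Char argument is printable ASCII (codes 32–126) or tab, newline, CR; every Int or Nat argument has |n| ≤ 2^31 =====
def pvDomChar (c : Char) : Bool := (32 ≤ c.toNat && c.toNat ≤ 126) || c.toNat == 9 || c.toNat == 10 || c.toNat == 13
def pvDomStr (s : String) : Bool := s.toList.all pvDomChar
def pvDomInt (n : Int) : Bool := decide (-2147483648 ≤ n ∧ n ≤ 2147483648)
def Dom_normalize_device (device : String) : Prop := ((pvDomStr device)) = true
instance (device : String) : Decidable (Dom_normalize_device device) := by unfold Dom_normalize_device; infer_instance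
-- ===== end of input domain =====

-- B replaces A's linear scan over the mapping's keys by an alias-sorted flat table
-- searched with iterative binary search (objective: alternative; not measurably faster).

-- ===== PORT A =====
-- card_mapping, iterated as Python iterates the dict: (key, value) in insertion order
def cardItems : List (String × List String) := [
  ("A100", ["A100-PCIE-40GB", "A100-SXM4-40GB"]),
  ("H100", ["NVIDIA H100 PCIe"]),
  ("V100", ["Tesla V100-SXM2-16GB"]),
  ("P100", ["Tesla P100-PCIE-16GB"]),
  ("T4", ["Tesla T4"]),
  ("A5000", ["NVIDIA RTX A5000"]),
  ("GTX 1080 Ti", ["GeForce GTX 1080 Ti", "NVIDIA GeForce GTX 1080 Ti"]),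
  ("RTX 2070", ["GeForce RTX 2070 SUPER", "NVIDIA GeForce RTX 2070 SUPER"]),
  ("RTX 2080 Ti", ["GeForce RTX 2080 Ti", "NVIDIA GeForce RTX 2080 Ti"]),
  ("RTX 3080", ["GeForce RTX 3080", "NVIDIA GeForce RTX 3080"]),
  ("RTX 3080 Ti", ["GeForce RTX 3080 Ti", "NVIDIA GeForce RTX 3080 Ti"]),
  ("RTX 3090", ["GeForce RTX 3090", "NVIDIA GeForce RTX 3090"]),
  ("RTX 3090 Ti", ["GeForce RTX 3090 Ti", "NVIDIA GeForce RTX 3090 Ti"]),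
  ("RTX 4090", ["GeForce RTX 4090", "NVIDIA GeForce RTX 4090"]),
  ("RTX 4090 Ti", ["GeForce RTX 4090 Ti", "NVIDIA GeForce RTX 4090 Ti"])]

-- 'for c in card_mapping: if new_dev in card_mapping[c]: return c' — fall through = none
def loopA : List (String × List String) → String → Option String
  | [], _ => none
  | (c, aliases) :: rest, s => if aliases.contains s then some c else loopA rest s

def normalize_device (device : String) : Option String :=
  let newDev := if PySem.Str.isIn "#" device
    then (((PySem.Str.split? device " #").getD []).headD "")  -- sep " #" ≠ "" so split? = some, and the list is never []; [0] is its head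
    else device
  loopA cardItems newDev

-- ===== PORT B =====
-- the module-level _SORTED_PAIRS literal: (alias, canonical), sorted by alias
def sortedPairs : List (String × String) := [
  ("A100-PCIE-40GB", "A100"),
  ("A100-SXM4-40GB", "A100"),
  ("GeForce GTX 1080 Ti", "GTX 1080 Ti"),
  ("GeForce RTX 2070 SUPER", "RTX 2070"),
  ("GeForce RTX 2080 Ti", "RTX 2080 Ti"),
  ("GeForce RTX 3080", "RTX 3080"),
  ("GeForce RTX 3080 Ti", "RTX 3080 Ti"),
  ("GeForce RTX 3090", "RTX 3090"),
  ("GeForce RTX 3090 Ti", "RTX 3090 Ti"),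
  ("GeForce RTX 4090", "RTX 4090"),
  ("GeForce RTX 4090 Ti", "RTX 4090 Ti"),
  ("NVIDIA GeForce GTX 1080 Ti", "GTX 1080 Ti"),
  ("NVIDIA GeForce RTX 2070 SUPER", "RTX 2070"),
  ("NVIDIA GeForce RTX 2080 Ti", "RTX 2080 Ti"),
  ("NVIDIA GeForce RTX 3080", "RTX 3080"),
  ("NVIDIA GeForce RTX 3080 Ti", "RTX 3080 Ti"),
  ("NVIDIA GeForce RTX 3090", "RTX 3090"),
  ("NVIDIA GeForce RTX 3090 Ti", "RTX 3090 Ti"),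
  ("NVIDIA GeForce RTX 4090", "RTX 4090"),
  ("NVIDIA GeForce RTX 4090 Ti", "RTX 4090 Ti"),
  ("NVIDIA H100 PCIe", "H100"),
  ("NVIDIA RTX A5000", "A5000"),
  ("Tesla P100-PCIE-16GB", "P100"),
  ("Tesla T4", "T4"),
  ("Tesla V100-SXM2-16GB", "V100")]

-- the 'while lo < hi' binary-search loop; _SORTED_PAIRS[mid] is always in range
def bsearch (pairs : List (String × String)) (s : String) (lo hi : Nat) : Option String :=
  if _h : lo < hi then
    let mid := (lo + hi) / 2
    let p := pairs.getD mid ("", "")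
    if p.1 = s then some p.2
    else if p.1 < s then bsearch pairs s (mid + 1) hi
    else bsearch pairs s lo mid
  else none
termination_by hi - lo
decreasing_by all_goals omega

def normalize_device_alt (device : String) : Option String :=
  let newDev := if PySem.Str.isIn "#" device
    then (((PySem.Str.split? device " #").getD []).headD "")
    else device
  bsearch sortedPairs newDev 0 sortedPairs.length

-- ===== PRECONDITION & SPEC =====
def Spec_normalize_device (device : String) (out : Option String) : Prop := out = normalize_device_alt device
instance (device : String) (out : Option String) : Decidable (Spec_normalize_device device out) := by unfold Spec_normalize_device; infer_instance

-- ===== CLAIM (what is proved, stated in full; the proofs are below) =====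
def Claim_equal_normalize_device : Prop := ∀ (device : String), Dom_normalize_device device → Spec_normalize_device device (normalize_device device)

-- ===== LEMMAS AND PROOFS =====

-- first-match lookup by key in a flat association list
def keyFind : List (String × String) → String → Option String
  | [], _ => none
  | (a, c) :: rest, s => if a = s then some c else keyFind rest s

theorem keyFind_eq_none_of_forall (L : List (String × String)) (s : String)
    (h : ∀ p ∈ L, p.1 ≠ s) : keyFind L s = none := by
  induction L with
  | nil => rfl
  | cons p rest ih =>
      obtain ⟨a, c⟩ := p
      have ha : a ≠ s := h (a, c) (List.mem_cons_self ..)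
      simp only [keyFind, if_neg ha]
      exact ih (fun q hq => h q (List.mem_cons_of_mem _ hq))

theorem keyFind_eq_some_of_mem (L : List (String × String)) (s v : String)
    (hnd : (L.map Prod.fst).Nodup) (hm : (s, v) ∈ L) : keyFind L s = some v := by
  induction L with
  | nil => cases hm
  | cons p rest ih =>
      obtain ⟨a, c⟩ := p
      simp only [List.map_cons, List.nodup_cons] at hnd
      rcases List.mem_cons.mp hm with h | h
      · cases h; simp [keyFind]
      · have ha : a ≠ s := by
          intro e; apply hnd.1; rw [e]
          exact List.mem_map.mpr ⟨(s, v), h, rfl⟩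
        simp [keyFind, ha, ih hnd.2 h]

theorem mem_of_keyFind_eq_some (L : List (String × String)) (s v : String)
    (h : keyFind L s = some v) : (s, v) ∈ L := by
  induction L with
  | nil => simp [keyFind] at h
  | cons p rest ih =>
      obtain ⟨a, c⟩ := p
      by_cases ha : a = s
      · subst ha
        simp [keyFind] at h
        rw [← h]
        exact List.mem_cons_self ..
      · simp only [keyFind, ha, if_false] at h
        exact List.mem_cons_of_mem _ (ih h)

-- A's scan over cardItems = first-match lookup in the flattened alias list
def flatPairs : List (String × String) :=
  cardItems.flatMap (fun p => p.2.map (fun a => (a, p.1)))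

theorem loopA_eq_keyFind (L : List (String × List String)) (s : String) :
    loopA L s = keyFind (L.flatMap (fun p => p.2.map (fun a => (a, p.1)))) s := by
  induction L with
  | nil => rfl
  | cons p rest ih =>
      obtain ⟨c, aliases⟩ := p
      simp only [loopA, List.flatMap_cons, ih]
      induction aliases with
      | nil => simp
      | cons a al iha =>
          simp only [List.map_cons, List.cons_append, keyFind, List.contains_cons]
          by_cases h : a = s
          · simp [h]
          · have hs : (s == a) = false := beq_eq_false_iff_ne.mpr (fun e => h e.symm)
            simp only [hs, Bool.false_or, if_neg h]
            exact iha

-- permutation + unique keys ⇒ same first-match lookup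
theorem keyFind_of_perm (L L' : List (String × String)) (s : String)
    (hp : L.Perm L') (hnd : (L.map Prod.fst).Nodup) : keyFind L s = keyFind L' s := by
  have hnd' : (L'.map Prod.fst).Nodup := ((hp.map Prod.fst).nodup_iff).mp hnd
  cases h : keyFind L s with
  | some v =>
      exact (keyFind_eq_some_of_mem L' s v hnd' (hp.mem_iff.mp (mem_of_keyFind_eq_some L s v h))).symm
  | none =>
      refine (keyFind_eq_none_of_forall L' s ?_).symm
      intro p hp' hps
      have hm : (s, p.2) ∈ L := by
        have hmem : p ∈ L := hp.mem_iff.mpr hp'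
        rw [← hps]; simpa using hmem
      have hc := keyFind_eq_some_of_mem L s p.2 hnd hm
      rw [h] at hc; cases hc

-- binary search on a strictly key-sorted list computes first-match lookup
theorem bsearch_correct (pairs : List (String × String)) (s : String)
    (hsort : pairs.Pairwise (fun p q => p.1 < q.1)) :
    ∀ lo hi, hi ≤ pairs.length →
      (∀ i, i < lo → (pairs.getD i ("", "")).1 < s) →
      (∀ i, hi ≤ i → i < pairs.length → s < (pairs.getD i ("", "")).1) →
      bsearch pairs s lo hi = keyFind pairs s := by
  have hkey : ∀ i j, i < pairs.length → j < pairs.length → i < j →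
      (pairs.getD i ("", "")).1 < (pairs.getD j ("", "")).1 := by
    intro i j hi hj hij
    have := List.pairwise_iff_getElem.mp hsort i j hi hj hij
    simpa [List.getD_eq_getElem?_getD, List.getElem?_eq_getElem, hi, hj] using this
  have hnd : (pairs.map Prod.fst).Nodup :=
    List.Pairwise.map Prod.fst (fun _ _ hab => ne_of_lt hab) hsort
  intro lo hi
  generalize hn : hi - lo = n
  induction n using Nat.strong_induction_on generalizing lo hi with
  | _ n ih =>
  intro hhi hlow hhigh
  rw [bsearch]
  by_cases hlh : lo < hi
  · simp only [hlh, dif_pos]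
    set mid := (lo + hi) / 2 with hmid
    have hmlt : mid < pairs.length := by omega
    by_cases heq : (pairs.getD mid ("", "")).1 = s
    · -- found: keyFind returns the value at mid since keys are strictly sorted
      simp only [heq, if_pos]
      have hmem : (s, (pairs.getD mid ("", "")).2) ∈ pairs := by
        have hm : pairs.getD mid ("", "") ∈ pairs := by
          rw [List.getD_eq_getElem?_getD, List.getElem?_eq_getElem hmlt]
          exact List.getElem_mem _
        rw [← heq]
        simpa using hm
      exact (keyFind_eq_some_of_mem pairs s _ hnd hmem).symm
    · simp only [heq]
      by_cases hlt : (pairs.getD mid ("", "")).1 < s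
      · simp only [hlt, if_pos]
        refine ih (hi - (mid + 1)) (by omega) (mid + 1) hi rfl hhi ?_ hhigh
        intro i hi'
        rcases Nat.lt_or_ge i mid with h | h
        · exact lt_trans (hkey i mid (by omega) hmlt h) hlt
        · have : i = mid := by omega
          subst this; exact hlt
      · simp only [hlt]
        have hgt : s < (pairs.getD mid ("", "")).1 := by
          rcases lt_trichotomy (pairs.getD mid ("", "")).1 s with h | h | h
          · exact absurd h hlt
          · exact absurd h heq
          · exact h
        refine ih (mid - lo) (by omega) lo mid rfl (by omega) hlow ?_
        intro i hmi hil
        rcases Nat.lt_or_ge mid i with h | h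
        · exact lt_trans hgt (hkey mid i hmlt hil h)
        · have : i = mid := by omega
          subst this; exact hgt
  · -- empty window: s occurs nowhere
    simp only [hlh]
    refine (keyFind_eq_none_of_forall pairs s ?_).symm
    intro p hp hps
    obtain ⟨idx, hil, hig⟩ := List.mem_iff_getElem.mp hp
    have hpd : (pairs.getD idx ("", "")).1 = s := by
      rw [List.getD_eq_getElem?_getD, List.getElem?_eq_getElem hil]
      simpa [hig] using hps
    rcases Nat.lt_or_ge idx lo with h | h
    · exact absurd hpd (ne_of_lt (hlow idx h))
    · have := hhigh idx (by omega) hil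
      rw [hpd] at this
      exact lt_irrefl _ this

set_option maxRecDepth 4000 in
theorem sortedPairs_keys_chain : (sortedPairs.map Prod.fst).IsChain (· < ·) := by
  simp only [sortedPairs, List.map_cons, List.map_nil]
  repeat (first | exact List.IsChain.singleton _ | refine List.IsChain.cons_cons ?_ ?_)
  all_goals (simp; decide)

theorem sortedPairs_sorted : sortedPairs.Pairwise (fun p q => p.1 < q.1) :=
  List.pairwise_map.mp (List.isChain_iff_pairwise.mp sortedPairs_keys_chain)

theorem sortedPairs_perm_flat : flatPairs.Perm sortedPairs := by decide

theorem flat_nodup : (flatPairs.map Prod.fst).Nodup := by decide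

theorem lookup_agree (s : String) :
    loopA cardItems s = bsearch sortedPairs s 0 sortedPairs.length := by
  rw [loopA_eq_keyFind]
  have h1 : keyFind flatPairs s = keyFind sortedPairs s :=
    keyFind_of_perm _ _ s sortedPairs_perm_flat flat_nodup
  have h2 := bsearch_correct sortedPairs s sortedPairs_sorted 0 sortedPairs.length
      (le_refl _) (by intro i hi; omega) (by intro i h1 h2; omega)
  show keyFind flatPairs s = _
  rw [h1, h2]

-- ===== VERDICT (by name: the statement is the Claim_ definition above) =====
theorem normalize_device_spec : Claim_equal_normalize_device := by
  intro device _
  unfold Spec_normalize_device normalize_device normalize_device_alt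
  exact lookup_agree _
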